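-- pv_equiv track=rewrite | github.com/Romerunn/Clasificador-de-datos | main.py | curso_mayor
-- ===== SOURCE A (Python) =====
-- def puntaje(p_nota : list, p_clave_ponderada : dict):
--     result = 0
--     for palabra in p_nota:
--         # .get(palabra, 0) busca la palabra.
--         # Si la encuentra, devuelve su peso (ej. 10).
--         # Si no la encuentra, devuelve 0.
--         result += p_clave_ponderada.get(palabra, 0)
--     return result
--
-- def curso_mayor(p_nota, dicti : dict):
--     max_puntaje = 0
--     result = ""
--     # 'i' ahora es el nombre del curso (ej. "Cálculo_diferencial")
--     for i in dicti:
--         # Pasamos solo el diccionario anidado de "palabras_clave"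
--         palabras_del_curso = dicti[i]["palabras_clave"]
--         temp = puntaje(p_nota, palabras_del_curso)
--
--         if max_puntaje < temp:
--             max_puntaje = temp
--             result = i
--     return result
-- ===== SOURCE B (Python) =====
-- def curso_mayor(p_nota, dicti: dict):
--     # Count each note word once, then score every course by iterating over its
--     # own keywords (weight * occurrence count) instead of re-scanning the note.
--     conteo = {}
--     for palabra in p_nota:
--         conteo[palabra] = conteo.get(palabra, 0) + 1
--     max_puntaje = 0
--     result = ""
--     for curso in dicti:
--         palabras = dicti[curso]["palabras_clave"]
--         s = 0
--         for clave, peso in palabras.items():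
--             s += peso * conteo.get(clave, 0)
--         if max_puntaje < s:
--             max_puntaje = s
--             result = curso
--     return result
-- ===== Notes on version B (the rewrite author's own statement) =====
-- stated objective: alternative
-- what changed: B builds an occurrence counter of the note once and scores each course by iterating over that course's keyword dict (weight times count), instead of A's re-scan of the whole note for every course.
import Mathlib
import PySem

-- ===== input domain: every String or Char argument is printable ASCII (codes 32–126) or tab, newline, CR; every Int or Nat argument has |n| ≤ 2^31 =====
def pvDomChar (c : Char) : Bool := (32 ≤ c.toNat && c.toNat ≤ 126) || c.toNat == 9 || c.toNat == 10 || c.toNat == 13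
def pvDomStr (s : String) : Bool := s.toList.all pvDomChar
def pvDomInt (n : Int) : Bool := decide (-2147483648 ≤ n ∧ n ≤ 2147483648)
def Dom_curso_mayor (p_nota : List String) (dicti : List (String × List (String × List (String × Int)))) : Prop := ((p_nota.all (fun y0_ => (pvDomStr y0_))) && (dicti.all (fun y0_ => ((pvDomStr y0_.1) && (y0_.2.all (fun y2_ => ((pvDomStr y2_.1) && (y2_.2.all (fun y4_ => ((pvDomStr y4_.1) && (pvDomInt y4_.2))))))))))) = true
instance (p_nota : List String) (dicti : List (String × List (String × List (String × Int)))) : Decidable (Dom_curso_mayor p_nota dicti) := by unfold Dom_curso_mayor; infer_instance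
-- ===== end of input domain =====

-- B replaces A's per-course re-scan of the whole note by one occurrence counter of the
-- note and a scan of each course's own keyword dict (alternative decomposition).

-- shared access expression: dicti[i]["palabras_clave"] (both Pythons contain it verbatim)
def pvPal (dicti : List (String × List (String × List (String × Int)))) (i : String) :
    List (String × Int) :=
  (PySem.Dict.mk ((PySem.Dict.mk dicti).getD i [])).getD "palabras_clave" []

-- ===== PORT A =====
def pvPuntaje (p_nota : List String) (pal : List (String × Int)) : Int :=
  p_nota.foldl (fun result palabra => result + (PySem.Dict.mk pal).getD palabra 0) 0

def curso_mayor (p_nota : List String) (dicti : List (String × List (String × List (String × Int)))) : String :=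
  (dicti.foldl (fun (st : Int × String) e =>
      let palabras_del_curso := pvPal dicti e.1
      let temp := pvPuntaje p_nota palabras_del_curso
      if st.1 < temp then (temp, e.1) else st)
    (0, "")).2

-- ===== PORT B =====
def curso_mayor_alt (p_nota : List String) (dicti : List (String × List (String × List (String × Int)))) : String :=
  let conteo := p_nota.foldl (fun d palabra => d.insert palabra (d.getD palabra 0 + 1))
    (PySem.Dict.empty : PySem.Dict String Int)
  (dicti.foldl (fun (st : Int × String) e =>
      let palabras := pvPal dicti e.1
      let s := palabras.foldl (fun s kv => s + kv.2 * conteo.getD kv.1 0) 0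
      if st.1 < s then (s, e.1) else st)
    (0, "")).2

-- ===== PRECONDITION & SPEC =====
-- Pre_ excludes association lists with duplicate keys at any dict level (a Python dict
-- cannot carry them; which of the duplicate values survives is accidental) and courses
-- whose inner dict has no "palabras_clave" key, on which the Python A raises KeyError.
def Pre_curso_mayor (p_nota : List String) (dicti : List (String × List (String × List (String × Int)))) : Prop :=
  (dicti.map Prod.fst).Nodup ∧
  ∀ e ∈ dicti, (e.2.map Prod.fst).Nodup ∧ "palabras_clave" ∈ e.2.map Prod.fst ∧
    ∀ pe ∈ e.2, (pe.2.map Prod.fst).Nodup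

instance (p_nota : List String) (dicti : List (String × List (String × List (String × Int)))) : Decidable (Pre_curso_mayor p_nota dicti) := by unfold Pre_curso_mayor; infer_instance

def pvWitness_curso_mayor : List String × (List (String × List (String × List (String × Int)))) :=
  (["a"], [("c", [("palabras_clave", [("a", 2)])])])

def Spec_curso_mayor (p_nota : List String) (dicti : List (String × List (String × List (String × Int)))) (out : String) : Prop := out = curso_mayor_alt p_nota dicti
instance (p_nota : List String) (dicti : List (String × List (String × List (String × Int)))) (out : String) : Decidable (Spec_curso_mayor p_nota dicti out) := by unfold Spec_curso_mayor; infer_instance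

-- ===== CLAIM (what is proved, stated in full; the proofs are below) =====
def Claim_equal_curso_mayor : Prop := ∀ (p_nota : List String) (dicti : List (String × List (String × List (String × Int)))), Dom_curso_mayor p_nota dicti → Pre_curso_mayor p_nota dicti → Spec_curso_mayor p_nota dicti (curso_mayor p_nota dicti)

-- ===== LEMMAS AND PROOFS =====

theorem pv_getD_mk_cons (k w : String) (v : Int) (rest : List (String × Int)) :
    (PySem.Dict.mk ((k, v) :: rest)).getD w 0
      = if k == w then v else (PySem.Dict.mk rest).getD w 0 := by
  rw [PySem.Dict.getD_eq_get?_getD, PySem.Dict.get?_mk_cons]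
  by_cases h : k == w <;> simp [h, PySem.Dict.getD_eq_get?_getD]

theorem pv_sum_ite (k : String) (v : Int) (nota : List String) :
    ((nota.map (fun w => if k == w then v else 0)).sum : Int) = v * (nota.count k : Int) := by
  induction nota with
  | nil => simp
  | cons w rest ih =>
    by_cases h : k = w
    · subst h
      simp only [List.map_cons, List.sum_cons, beq_self_eq_true, if_true,
        List.count_cons_self, ih]
      push_cast; ring
    · have h1 : (k == w) = false := beq_eq_false_iff_ne.mpr h
      simp only [List.map_cons, List.sum_cons, h1, ih,
        List.count_cons_of_ne (fun a => h a.symm)]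
      simp

theorem pv_sum_swap (nota : List String) (pal : List (String × Int))
    (hnd : (pal.map Prod.fst).Nodup) :
    (nota.map (fun w => (PySem.Dict.mk pal).getD w 0)).sum
      = (pal.map (fun kv => kv.2 * (nota.count kv.1 : Int))).sum := by
  induction pal with
  | nil =>
    have h0 : ∀ w : String, (PySem.Dict.mk ([] : List (String × Int))).getD w 0 = 0 := fun _ => rfl
    simp [h0]
  | cons kv rest ih =>
    obtain ⟨k, v⟩ := kv
    simp only [List.map_cons, List.nodup_cons] at hnd
    have hk : (PySem.Dict.mk rest).contains k = false := by
      rw [PySem.Dict.contains_mk]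
      simp only [List.any_eq_false]
      intro p hp hb
      exact hnd.1 (List.mem_map.mpr ⟨p, hp, (beq_iff_eq.mp hb)⟩)
    have hrest0 : (PySem.Dict.mk rest).getD k 0 = 0 :=
      PySem.Dict.getD_of_not_contains _ _ hk
    have hpt : ∀ w : String,
        (PySem.Dict.mk ((k, v) :: rest)).getD w 0
          = (if k == w then v else 0) + (PySem.Dict.mk rest).getD w 0 := by
      intro w
      rw [pv_getD_mk_cons]
      by_cases h : k = w
      · subst h; simp [hrest0]
      · simp [h]
    calc (nota.map (fun w => (PySem.Dict.mk ((k, v) :: rest)).getD w 0)).sum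
        = (nota.map (fun w => (if k == w then v else 0) + (PySem.Dict.mk rest).getD w 0)).sum := by
          exact congrArg List.sum (List.map_congr_left (fun w _ => hpt w))
      _ = (nota.map (fun w => if k == w then v else 0)).sum
            + (nota.map (fun w => (PySem.Dict.mk rest).getD w 0)).sum := by
          exact PySem.List.sum_map_add_int nota _ _
      _ = v * (nota.count k : Int)
            + (rest.map (fun kv => kv.2 * (nota.count kv.1 : Int))).sum := by
          rw [pv_sum_ite, ih hnd.2]
      _ = (((k, v) :: rest).map (fun kv => kv.2 * (nota.count kv.1 : Int))).sum := by
          simp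

theorem pv_score_eq (p_nota : List String) (pal : List (String × Int))
    (hnd : (pal.map Prod.fst).Nodup) :
    pvPuntaje p_nota pal
      = pal.foldl (fun s kv => s + kv.2 *
          (p_nota.foldl (fun d palabra => d.insert palabra (d.getD palabra 0 + 1))
            (PySem.Dict.empty : PySem.Dict String Int)).getD kv.1 0) 0 := by
  have hcnt : ∀ k : String,
      (p_nota.foldl (fun d palabra => d.insert palabra (d.getD palabra 0 + 1))
        (PySem.Dict.empty : PySem.Dict String Int)).getD k 0 = (p_nota.count k : Int) := by
    intro k
    rw [PySem.Dict.getD_foldl_insert_add_one]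
    simp
  rw [pvPuntaje, PySem.List.foldl_add, PySem.List.foldl_add]
  have h2 : (pal.map (fun kv => kv.2 *
      (p_nota.foldl (fun d palabra => d.insert palabra (d.getD palabra 0 + 1))
        (PySem.Dict.empty : PySem.Dict String Int)).getD kv.1 0)).sum
      = (pal.map (fun kv => kv.2 * (p_nota.count kv.1 : Int))).sum := by
    exact congrArg List.sum (List.map_congr_left (fun kv _ => by rw [hcnt kv.1]))
  rw [h2, pv_sum_swap p_nota pal hnd]

theorem pv_pal_nodup (dicti : List (String × List (String × List (String × Int))))
    (hnd : (dicti.map Prod.fst).Nodup)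
    (hpre : ∀ e ∈ dicti, (e.2.map Prod.fst).Nodup ∧ "palabras_clave" ∈ e.2.map Prod.fst ∧
      ∀ pe ∈ e.2, (pe.2.map Prod.fst).Nodup)
    (e : String × List (String × List (String × Int))) (he : e ∈ dicti) :
    ((pvPal dicti e.1).map Prod.fst).Nodup := by
  obtain ⟨hinner, hmem, hall⟩ := hpre e he
  have hkeys : (PySem.Dict.mk dicti).keys.Nodup := by simpa [PySem.Dict.keys_mk] using hnd
  have hget : (PySem.Dict.mk dicti).getD e.1 [] = e.2 :=
    PySem.Dict.getD_of_mem_items (PySem.Dict.mk dicti) (k := e.1) (v := e.2)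
      (by simpa using he) hkeys []
  unfold pvPal
  rw [hget]
  obtain ⟨pal0, hpm⟩ := List.mem_map.mp hmem
  have hcont : (PySem.Dict.mk e.2).contains "palabras_clave" = true := by
    rw [PySem.Dict.contains_mk]
    exact List.any_eq_true.mpr ⟨pal0, hpm.1, by simp [hpm.2]⟩
  have hsome : ((PySem.Dict.mk e.2).get? "palabras_clave").isSome := by
    rw [← PySem.Dict.contains_eq_isSome_get? (PySem.Dict.mk e.2)]; exact hcont
  obtain ⟨pal, hpal⟩ := Option.isSome_iff_exists.mp hsome
  rw [PySem.Dict.getD_of_get?_eq_some _ _ hpal]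
  have hin : ("palabras_clave", pal) ∈ e.2 := by
    simpa using PySem.Dict.mem_items_of_get?_eq_some (PySem.Dict.mk e.2) hpal
  exact hall _ hin

-- ===== VERDICT (by name: the statement is the Claim_ definition above) =====
theorem curso_mayor_spec : Claim_equal_curso_mayor := by
  intro p_nota dicti _ hpre
  obtain ⟨hnd, hcourses⟩ := hpre
  unfold Spec_curso_mayor curso_mayor curso_mayor_alt
  congr 1
  apply PySem.List.foldl_congr_mem
  intro st e he
  have := pv_score_eq p_nota (pvPal dicti e.1) (pv_pal_nodup dicti hnd hcourses e he)
  simp only [this]
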